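-- pv_equiv track=rewrite | github.com/freelulul/ppd | ppd/experiments/append_prefill_analysis.py | generate_context_text
-- ===== SOURCE A (Python) =====
-- def generate_context_text(num_tokens: int) -> str:
--     """Generate text that approximates a certain number of tokens"""
--     # Approximate: 1 token ≈ 4 characters for English text
--     # Use repetitive but varied text to simulate conversation history
--     base_sentences = [
--         "The quick brown fox jumps over the lazy dog. ",
--         "A journey of a thousand miles begins with a single step. ",
--         "To be or not to be, that is the question. ",
--         "All that glitters is not gold, as the saying goes. ",
--         "The early bird catches the worm but the second mouse gets cheese. ",
--     ]
--
--     # Each sentence is roughly 10-15 tokens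
--     chars_needed = num_tokens * 4
--     result = []
--     idx = 0
--     current_chars = 0
--
--     while current_chars < chars_needed:
--         result.append(base_sentences[idx % len(base_sentences)])
--         current_chars += len(base_sentences[idx % len(base_sentences)])
--         idx += 1
--
--     return "".join(result)[:chars_needed]
-- ===== SOURCE B (Python) =====
-- def generate_context_text(num_tokens: int) -> str:
--     """Generate text that approximates a certain number of tokens"""
--     base_sentences = [
--         "The quick brown fox jumps over the lazy dog. ",
--         "A journey of a thousand miles begins with a single step. ",
--         "To be or not to be, that is the question. ",
--         "All that glitters is not gold, as the saying goes. ",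
--         "The early bird catches the worm but the second mouse gets cheese. ",
--     ]
--     block = "".join(base_sentences)
--     chars_needed = num_tokens * 4
--     reps = chars_needed // len(block) + 1
--     return (block * reps)[:chars_needed]
-- ===== Notes on version B (the rewrite author's own statement) =====
-- stated objective: simpler
-- what changed: Replaces the while-loop that appends sentences one at a time until enough characters accumulate with a closed-form repetition count: join the sentences once into a block, compute reps = chars_needed // len(block) + 1, and return (block * reps)[:chars_needed].
import Mathlib
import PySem

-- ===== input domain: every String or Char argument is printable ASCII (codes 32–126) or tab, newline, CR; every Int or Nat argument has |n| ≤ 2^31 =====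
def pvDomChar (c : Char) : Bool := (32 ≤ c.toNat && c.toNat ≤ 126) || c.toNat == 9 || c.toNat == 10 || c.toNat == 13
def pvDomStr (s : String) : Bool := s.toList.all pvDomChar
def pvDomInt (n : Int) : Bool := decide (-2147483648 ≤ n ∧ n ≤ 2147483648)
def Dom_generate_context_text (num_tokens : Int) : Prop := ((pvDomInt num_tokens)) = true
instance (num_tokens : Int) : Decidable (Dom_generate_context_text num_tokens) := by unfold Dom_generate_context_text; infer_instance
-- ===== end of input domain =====

-- B replaces A's sentence-appending while-loop by a closed-form repetition count
-- (reps = chars_needed // len(block) + 1) and one slice; objective: simpler.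

-- ===== PORT A =====
def pvBase : List String := [
  "The quick brown fox jumps over the lazy dog. ",
  "A journey of a thousand miles begins with a single step. ",
  "To be or not to be, that is the question. ",
  "All that glitters is not gold, as the saying goes. ",
  "The early bird catches the worm but the second mouse gets cheese. "]

-- every sentence has positive length (used only for the loop's termination)
theorem pvBase_len_pos : ∀ r : Nat, r < 5 → 0 < PySem.Str.len (pvBase.getD r "") := by decide

-- the while-loop of A: result/idx/current_chars are the loop state
def pvLoopA (chars_needed : Int) (result : List String) (idx : Nat) (current_chars : Int) :
    List String :=
  if current_chars < chars_needed then
    let s := pvBase.getD (idx % 5) ""   -- base_sentences[idx % len(base_sentences)]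
    pvLoopA chars_needed (result ++ [s]) (idx + 1) (current_chars + PySem.Str.len s)
  else result
termination_by (chars_needed - current_chars).toNat
decreasing_by
  have := pvBase_len_pos (idx % 5) (Nat.mod_lt _ (by norm_num))
  omega

def generate_context_text (num_tokens : Int) : String :=
  let chars_needed := num_tokens * 4
  PySem.Str.slice (PySem.Str.join "" (pvLoopA chars_needed [] 0 0)) none (some chars_needed)

-- ===== PORT B =====
-- Python's `s * n` on a string, exactly (empty for n ≤ 0)
def pvStrMul (s : String) (n : Int) : String := String.ofList (PySem.List.pyRepeat s.toList n)

def generate_context_text_alt (num_tokens : Int) : String :=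
  let block := PySem.Str.join "" pvBase
  let chars_needed := num_tokens * 4
  let reps := PySem.Int.floordiv chars_needed (PySem.Str.len block) + 1
  PySem.Str.slice (pvStrMul block reps) none (some chars_needed)

-- ===== PRECONDITION & SPEC =====
def Spec_generate_context_text (num_tokens : Int) (out : String) : Prop := out = generate_context_text_alt num_tokens
instance (num_tokens : Int) (out : String) : Decidable (Spec_generate_context_text num_tokens out) := by unfold Spec_generate_context_text; infer_instance

-- ===== CLAIM (what is proved, stated in full; the proofs are below) =====
def Claim_equal_generate_context_text : Prop := ∀ (num_tokens : Int), Dom_generate_context_text num_tokens → Spec_generate_context_text num_tokens (generate_context_text num_tokens)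

-- ===== LEMMAS AND PROOFS =====

-- ''.join with empty separator is flatten
theorem pv_join_nil (ls : List (List Char)) : PySem.Chars.join [] ls = ls.flatten := by
  simp [PySem.Chars.join, List.intercalate]
  induction ls with
  | nil => simp
  | cons a t ih => cases t <;> simp_all [List.intersperse]

-- the concatenation of all five sentences, as a character list
def pvL : List Char := (pvBase.map String.toList).flatten

set_option maxRecDepth 20000 in
theorem pvL_len : pvL.length = 261 := by decide

-- pvL repeated k times
def pvRep (k : Nat) : List Char := (List.replicate k pvL).flatten

theorem pvRep_add (a b : Nat) : pvRep (a + b) = pvRep a ++ pvRep b := by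
  simp only [pvRep, List.replicate_add, List.flatten_append]

theorem pvRep_succ' (k : Nat) : pvRep (k + 1) = pvRep k ++ pvL := by
  rw [pvRep_add]; simp [pvRep]

theorem pvRep_len (k : Nat) : (pvRep k).length = k * 261 := by
  induction k with
  | zero => simp [pvRep]
  | succ k ih => rw [pvRep_succ']; simp [ih, pvL_len]; ring

-- the first r sentences (r ≤ 5), as a character list
def pvPart (r : Nat) : List Char := ((pvBase.take r).map String.toList).flatten

-- the characters produced after idx iterations of A's loop
def pvPref (idx : Nat) : List Char := pvRep (idx / 5) ++ pvPart (idx % 5)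

set_option maxRecDepth 20000 in
theorem pvPart_succ (r : Nat) (hr : r < 5) :
    pvPart (r + 1) = pvPart r ++ (pvBase.getD r "").toList := by
  interval_cases r <;> decide

set_option maxRecDepth 20000 in
theorem pvPart_four : pvPart 4 ++ (pvBase.getD 4 "").toList = pvL := by decide

theorem pvPref_succ (idx : Nat) :
    pvPref (idx + 1) = pvPref idx ++ (pvBase.getD (idx % 5) "").toList := by
  have hr : idx % 5 < 5 := Nat.mod_lt _ (by norm_num)
  by_cases h4 : idx % 5 = 4
  · have hd : (idx + 1) / 5 = idx / 5 + 1 := by omega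
    have hm : (idx + 1) % 5 = 0 := by omega
    rw [pvPref, pvPref, hd, hm, h4, pvRep_succ']
    simp [pvPart, ← pvPart_four]
  · have hd : (idx + 1) / 5 = idx / 5 := by omega
    have hm : (idx + 1) % 5 = idx % 5 + 1 := by omega
    rw [pvPref, pvPref, hd, hm, pvPart_succ _ hr, List.append_assoc]

theorem pvPart_prefix (r : Nat) : pvPart r <+: pvL :=
  ⟨((pvBase.drop r).map String.toList).flatten, by
    rw [pvPart, pvL, ← List.flatten_append, ← List.map_append, List.take_append_drop]⟩

theorem pvPref_prefix (idx : Nat) : pvPref idx <+: pvRep (idx / 5 + 1) := by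
  rw [pvRep_succ']
  obtain ⟨t, ht⟩ := pvPart_prefix (idx % 5)
  exact ⟨t, by rw [pvPref, List.append_assoc, ht]⟩

-- equal takes of two sufficiently long repetitions
theorem pv_take_rep (n a b : Nat) (ha : n ≤ a * 261) (hb : n ≤ b * 261) :
    (pvRep a).take n = (pvRep b).take n := by
  rcases Nat.le_total a b with h | h
  · obtain ⟨d, rfl⟩ := Nat.exists_eq_add_of_le h
    rw [pvRep_add, List.take_append_of_le_length (by rw [pvRep_len]; exact ha)]
  · obtain ⟨d, rfl⟩ := Nat.exists_eq_add_of_le h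
    rw [pvRep_add, List.take_append_of_le_length (by rw [pvRep_len]; exact hb)]

-- a take of a prefix is a take of the whole
theorem pv_take_of_prefix {p l : List Char} (h : p <+: l) {n : Nat} (hn : n ≤ p.length) :
    p.take n = l.take n := by
  obtain ⟨t, rfl⟩ := h
  rw [List.take_append_of_le_length hn]

-- invariant of A's loop: the joined result is always pvPref of the step count,
-- current_chars is its length, and on exit its length is ≥ chars_needed
theorem pvLoopA_spec : ∀ (n : Nat) (c cc : Int) (idx : Nat) (result : List String),
    (c - cc).toNat = n →
    cc = ((pvPref idx).length : Int) →
    (result.map String.toList).flatten = pvPref idx →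
    ∃ m, ((pvLoopA c result idx cc).map String.toList).flatten = pvPref m ∧
      c ≤ ((pvPref m).length : Int) := by
  intro n
  induction n using Nat.strong_induction_on with
  | _ n ih =>
    intro c cc idx result hn hcc hflat
    rw [pvLoopA]
    split_ifs with h
    · have hpos := pvBase_len_pos (idx % 5) (Nat.mod_lt _ (by norm_num))
      refine ih (c - (cc + PySem.Str.len (pvBase.getD (idx % 5) ""))).toNat (by omega)
        c _ (idx + 1) _ rfl ?_ ?_
      · rw [pvPref_succ]
        simp [hcc, PySem.Str.len]
      · rw [pvPref_succ, ← hflat]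
        simp
    · exact ⟨idx, hflat, by omega⟩

set_option maxRecDepth 20000 in
theorem generate_context_text_spec : Claim_equal_generate_context_text := by
  intro num_tokens _
  unfold Spec_generate_context_text generate_context_text generate_context_text_alt
  set c : Int := num_tokens * 4 with hc
  rw [← String.toList_inj]
  have hlenblock : PySem.Str.len (PySem.Str.join "" pvBase) = 261 := by decide
  simp only [PySem.Str.slice, String.toList_ofList, PySem.Chars.slice_eq_listSlice,
    pvStrMul, hlenblock, PySem.Str.toList_join]
  have hjoin0 : ("" : String).toList = [] := rfl
  have hbl : PySem.Chars.join [] (List.map String.toList pvBase) = pvL := by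
    rw [pv_join_nil]; rfl
  rw [hjoin0, hbl, pv_join_nil]
  rcases lt_trichotomy c 0 with hneg | hzero | hpos
  · -- chars_needed < 0 : the loop never runs and block * reps is empty
    have hnc : ¬ ((0 : Int) < c) := by omega
    have hA : pvLoopA c [] 0 0 = [] := by rw [pvLoopA]; simp [hnc]
    have hreps : (PySem.Int.floordiv c 261 + 1).toNat = 0 := by
      have : PySem.Int.floordiv c 261 < 0 := by
        rw [PySem.Int.floordiv_lt_iff_lt_mul (by norm_num)]; omega
      omega
    have hB : PySem.List.pyRepeat pvL (PySem.Int.floordiv c 261 + 1) = [] := by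
      show (List.replicate (PySem.Int.floordiv c 261 + 1).toNat pvL).flatten = []
      rw [hreps]; rfl
    rw [hA, hB]
    simp [PySem.List.slice]
  · -- chars_needed = 0 : both slices take 0 characters
    have hnc : ¬ ((0 : Int) < c) := by omega
    have hA : pvLoopA c [] 0 0 = [] := by rw [pvLoopA]; simp [hnc]
    rw [hA, PySem.List.slice_to _ (by omega : (0:Int) ≤ c),
      PySem.List.slice_to _ (by omega : (0:Int) ≤ c)]
    simp [hzero]
  · -- chars_needed > 0 : both sides are take chars_needed of a long enough repetition
    obtain ⟨m, hflat, hlen⟩ := pvLoopA_spec (c - 0).toNat c 0 0 [] rfl (by decide) (by decide)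
    rw [hflat, PySem.List.slice_to _ (by omega : (0:Int) ≤ c),
      PySem.List.slice_to _ (by omega : (0:Int) ≤ c)]
    -- A's side: take of pvPref m = take of pvRep (m/5+1)
    have hA : (pvPref m).take c.toNat = (pvRep (m / 5 + 1)).take c.toNat :=
      pv_take_of_prefix (pvPref_prefix m) (by omega)
    -- B's side: block * reps is pvRep reps.toNat
    have hBrep : PySem.List.pyRepeat pvL (PySem.Int.floordiv c 261 + 1) =
        pvRep (PySem.Int.floordiv c 261 + 1).toNat := rfl
    rw [hA, hBrep]
    -- lengths: c ≤ (m/5+1)*261 and c ≤ reps.toNat*261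
    have h1 : ((pvPref m).length : Int) ≤ ((m / 5 + 1) * 261 : Nat) := by
      have := (pvPref_prefix m).length_le
      rw [pvRep_len] at this
      exact_mod_cast this
    have hfd0 : 0 ≤ PySem.Int.floordiv c 261 := by
      rw [PySem.Int.floordiv_eq_ediv_of_pos (by norm_num)]
      exact Int.ediv_nonneg (by omega) (by norm_num)
    have hfd : c < (PySem.Int.floordiv c 261 + 1) * 261 := by
      rw [← PySem.Int.floordiv_lt_iff_lt_mul (by norm_num)]; omega
    apply pv_take_rep
    · omega
    · have : ((PySem.Int.floordiv c 261 + 1).toNat : Int) = PySem.Int.floordiv c 261 + 1 := by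
        omega
      omega
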